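-- pv_equiv track=rewrite | github.com/zihyang-227/PilotAI | healthAI/code2.0(file1trial).py | assign_episode_numbers
-- ===== SOURCE A (Python) =====
-- def assign_episode_numbers(shifts):
--     ep = 1
--     ep_nums = []
--     for i, s in enumerate(shifts):
--         if i > 0 and s == "NEW":
--             ep += 1
--         ep_nums.append(ep)
--     return ep_nums
-- ===== SOURCE B (Python) =====
-- def assign_episode_numbers(shifts):
--     n = len(shifts)
--     out = []
--     ep = 1
--     i = 0
--     while i < n:
--         j = i + 1
--         while j < n and shifts[j] != "NEW":
--             j += 1
--         out.extend([ep] * (j - i))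
--         ep += 1
--         i = j
--     return out
-- ===== Notes on version B (the rewrite author's own statement) =====
-- stated objective: alternative
-- what changed: Per-element counter bump replaced by segment expansion: scan for the next NEW boundary and emit the whole run of equal episode numbers at once.
import Mathlib
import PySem

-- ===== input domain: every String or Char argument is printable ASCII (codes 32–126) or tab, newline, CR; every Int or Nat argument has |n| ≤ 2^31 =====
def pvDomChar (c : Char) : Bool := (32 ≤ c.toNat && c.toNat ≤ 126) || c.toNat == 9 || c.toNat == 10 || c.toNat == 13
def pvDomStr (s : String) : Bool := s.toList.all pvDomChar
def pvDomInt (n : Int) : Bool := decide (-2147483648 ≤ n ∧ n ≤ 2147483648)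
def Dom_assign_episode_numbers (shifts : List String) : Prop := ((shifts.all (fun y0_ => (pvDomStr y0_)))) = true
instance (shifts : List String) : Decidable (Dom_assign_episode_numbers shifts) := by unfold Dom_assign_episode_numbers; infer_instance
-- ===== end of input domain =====

-- B replaces A's per-element counter bump by segment expansion (find next "NEW" boundary, emit a run); alternative decomposition, same cost.


-- ===== PORT A =====
-- loop body of A: maybe bump ep, append it to ep_nums
def pvStepA (st : Int × List Int) (p : Int × String) : Int × List Int :=
  let ep := if p.1 > 0 ∧ p.2 = "NEW" then st.1 + 1 else st.1
  (ep, st.2 ++ [ep])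

-- literal port: fold over enumerate(shifts) carrying (ep, ep_nums)
def assign_episode_numbers (shifts : List String) : List Int :=
  ((PySem.List.enumerate shifts 0).foldl pvStepA ((1 : Int), ([] : List Int))).2

-- ===== PORT B =====
-- inner while loop of Source B: advance j while j < n and shifts[j] != "NEW"
def pvFindNext (shifts : List String) (n j : Nat) : Nat :=
  if _h : j < n ∧ shifts.getD j "" ≠ "NEW" then pvFindNext shifts n (j+1) else j
termination_by n - j

theorem pvFindNext_ge (shifts : List String) (n j : Nat) : j ≤ pvFindNext shifts n j := by
  unfold pvFindNext
  split
  · exact Nat.le_trans (Nat.le_succ j) (pvFindNext_ge shifts n (j+1))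
  · exact Nat.le_refl j
termination_by n - j

-- outer while loop of Source B: emit one run per segment
def pvGoB (shifts : List String) (n : Nat) (ep : Int) (i : Nat) : List Int :=
  if _h : i < n then
    let j := pvFindNext shifts n (i+1)
    List.replicate (j - i) ep ++ pvGoB shifts n (ep+1) j
  else []
termination_by n - i
decreasing_by
  have := pvFindNext_ge shifts n (i+1)
  omega

def assign_episode_numbers_alt (shifts : List String) : List Int :=
  pvGoB shifts shifts.length 1 0

-- ===== PRECONDITION & SPEC =====
def Spec_assign_episode_numbers (shifts : List String) (out : List Int) : Prop := out = assign_episode_numbers_alt shifts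
instance (shifts : List String) (out : List Int) : Decidable (Spec_assign_episode_numbers shifts out) := by unfold Spec_assign_episode_numbers; infer_instance

-- ===== CLAIM (what is proved, stated in full; the proofs are below) =====
def Claim_equal_assign_episode_numbers : Prop := ∀ (shifts : List String), Dom_assign_episode_numbers shifts → Spec_assign_episode_numbers shifts (assign_episode_numbers shifts)

-- ===== LEMMAS AND PROOFS =====

-- canonical running-counter form: each "NEW" bumps the counter, every element gets the current counter
def epRun : Int → List String → List Int
  | _, [] => []
  | ep, x :: t =>
    let e := if x = "NEW" then ep + 1 else ep
    e :: epRun e t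

theorem foldlA_eq (l : List (Int × String)) (ep : Int) (acc : List Int)
    (hpos : ∀ p ∈ l, 0 < p.1) :
    (l.foldl pvStepA (ep, acc)).2 = acc ++ epRun ep (l.map (·.2)) := by
  induction l generalizing ep acc with
  | nil => simp [epRun]
  | cons p t ih =>
    have hp : 0 < p.1 := hpos p (List.mem_cons_self)
    have ht : ∀ q ∈ t, 0 < q.1 := fun q hq => hpos q (List.mem_cons_of_mem _ hq)
    simp only [List.foldl_cons, List.map_cons, epRun]
    by_cases hnew : p.2 = "NEW" <;>
      simp [pvStepA, hnew, hp, ih _ _ ht]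

theorem A_eq (x : String) (t : List String) :
    assign_episode_numbers (x :: t) = 1 :: epRun 1 t := by
  unfold assign_episode_numbers
  rw [PySem.List.enumerate_cons]
  simp only [List.foldl_cons]
  have hpos : ∀ p ∈ PySem.List.enumerate t 1, 0 < p.1 := by
    intro p hp
    rcases (PySem.List.mem_enumerate_iff _ _ _).1 hp with ⟨k, hk, rfl⟩
    simp
    omega
  have hstep : pvStepA ((1 : Int), ([] : List Int)) (0, x) = (1, [1]) := by
    simp [pvStepA]
  rw [hstep]
  simp only [zero_add]
  rw [foldlA_eq _ _ _ hpos]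
  simp [PySem.List.map_snd_enumerate]

-- pvFindNext lands exactly past the non-"NEW" prefix of shifts.drop j
theorem pvFindNext_spec (shifts : List String) (j : Nat) (hj : j ≤ shifts.length) :
    pvFindNext shifts shifts.length j
      = j + ((shifts.drop j).takeWhile (fun x => decide (x ≠ "NEW"))).length := by
  unfold pvFindNext
  split
  · rename_i h
    obtain ⟨hlt, hne⟩ := h
    have hdrop : shifts.drop j = shifts[j] :: shifts.drop (j+1) :=
      List.drop_eq_getElem_cons hlt
    have hget : shifts.getD j "" = shifts[j] := by
      simp [List.getD, List.getElem?_eq_getElem hlt]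
    rw [hget] at hne
    rw [pvFindNext_spec shifts (j+1) hlt, hdrop, List.takeWhile_cons,
      if_pos (decide_eq_true hne), List.length_cons]
    omega
  · rename_i h
    by_cases hl : j < shifts.length
    · have hnew : shifts.getD j "" = "NEW" := by
        by_contra hne; exact h ⟨hl, hne⟩
      have hget : shifts.getD j "" = shifts[j] := by
        simp [List.getD, List.getElem?_eq_getElem hl]
      rw [hget] at hnew
      have hdrop : shifts.drop j = shifts[j] :: shifts.drop (j+1) :=
        List.drop_eq_getElem_cons hl
      rw [hdrop, List.takeWhile_cons, if_neg (by simp [hnew])]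
      simp
    · have : j = shifts.length := by omega
      subst this; simp
termination_by shifts.length - j

-- epRun splits at the first "NEW": a run of the current counter, then a bumped counter
theorem epRun_split (u : List String) (ep : Int) :
    epRun ep u
      = List.replicate ((u.takeWhile (fun x => decide (x ≠ "NEW"))).length) ep
        ++ (match u.dropWhile (fun x => decide (x ≠ "NEW")) with
            | [] => []
            | _ :: r => (ep+1) :: epRun (ep+1) r) := by
  induction u generalizing ep with
  | nil => simp [epRun]
  | cons x t ih =>
    by_cases hx : x = "NEW"
    · simp [epRun, hx, List.dropWhile_cons]
    · simp [epRun, hx, List.replicate_succ, ih]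

theorem goB_eq (shifts : List String) (i : Nat) (ep : Int) (hi : i < shifts.length) :
    pvGoB shifts shifts.length ep i = ep :: epRun ep (shifts.drop (i+1)) := by
  rw [pvGoB]
  simp only [dif_pos hi]
  set u := shifts.drop (i+1) with hu
  set t := u.takeWhile (fun x => decide (x ≠ "NEW")) with ht
  set d := u.dropWhile (fun x => decide (x ≠ "NEW")) with hd
  have hj : pvFindNext shifts shifts.length (i+1) = (i+1) + t.length :=
    pvFindNext_spec shifts (i+1) hi
  have hulen : u.length = shifts.length - (i+1) := by simp [hu]
  have htd : t ++ d = u := List.takeWhile_append_dropWhile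
  have htdlen : t.length + d.length = u.length := by
    rw [← List.length_append, htd]
  have hdropj : shifts.drop ((i+1) + t.length) = d := by
    rw [← List.drop_drop, ← hu, ← htd, List.drop_left]
  rw [hj]
  have hrep : (i + 1 + t.length - i) = t.length + 1 := by omega
  rw [hrep]
  rw [epRun_split u ep, ← ht, ← hd]
  cases hdc : d with
  | nil =>
    have hjn : ¬ ((i+1) + t.length < shifts.length) := by
      have : d.length = 0 := by rw [hdc]; rfl
      omega
    rw [pvGoB]
    simp only [dif_neg hjn]
    simp [List.replicate_succ]
  | cons y r =>
    have hjn : (i+1) + t.length < shifts.length := by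
      have : d.length = r.length + 1 := by rw [hdc]; simp
      omega
    rw [goB_eq shifts ((i+1) + t.length) (ep+1) hjn]
    have : shifts.drop ((i+1) + t.length + 1) = r := by
      rw [← List.drop_drop]
      rw [hdropj, hdc]
      simp
    rw [this]
    simp [List.replicate_succ]
termination_by shifts.length - i
decreasing_by omega

-- ===== VERDICT (by name: the statement is the Claim_ definition above) =====
theorem assign_episode_numbers_spec : Claim_equal_assign_episode_numbers := by
  intro shifts _
  unfold Spec_assign_episode_numbers assign_episode_numbers_alt
  cases shifts with
  | nil => simp [assign_episode_numbers, PySem.List.enumerate_nil, pvGoB]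
  | cons x t =>
    rw [A_eq, goB_eq (x :: t) 0 1 (by simp)]
    simp
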